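-- pv_equiv track=rewrite | github.com/kapil-varshney/image_processing | zoom/zoom_lists.py | pixel_rep
-- ===== SOURCE A (Python) =====
-- def pixel_rep(img_l, height, width, k=2):
--     '''
--     Function to apply Pixel replication on a single channel of an image
--
--     img_l - single channel of the original image in list
--     height - height of the Image
--     width - width of the image
--     k - the zoom factor/scale
--
--     returns the Pixel Replicated zoomed-in channel of the image
--     '''
--
--     # Initialize the zoom channel
--     zoom_ch = [[0 for j in range(width*k)] for i in range(height*k)]
--
--     # Pixel Repition along the width and height
--     for h in range(height):
--         for w in range(width):
--
--             for i in range(h*k, h*k+k):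
--                 for j in range(w*k, w*k+k):
--                     zoom_ch[i][j] = img_l[h][w]
--
--     return zoom_ch
-- ===== SOURCE B (Python) =====
-- def pixel_rep(img_l, height, width, k=2):
--     '''Pixel replication zoom: build each expanded row once, append k copies.'''
--     zoom_ch = []
--     for h in range(height):
--         row = []
--         for w in range(width):
--             row += [img_l[h][w]] * k
--         for _ in range(k):
--             zoom_ch.append(list(row))
--     return zoom_ch
-- ===== Notes on version B (the rewrite author's own statement) =====
-- stated objective: simpler
-- what changed: Replaces A's preallocated zeroed matrix with four nested index-assignment loops by direct construction: each expanded row is built once by concatenating k copies of every source pixel, then k fresh copies of it are appended to the output.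
-- intended difference: When height<0 and k<0, A returns a phantom (height*k) x (width*k) matrix of zeros (its preallocation multiplies two negatives) while B returns the intended empty list, since a negative height means no source rows to replicate. — e.g. on pixel_rep([], -1, 0, -1): A returns [[]], B returns []
-- outside the precondition, e.g. on pixel_rep([], 1, 1, 0): A returns [], B raises IndexError
import Mathlib
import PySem

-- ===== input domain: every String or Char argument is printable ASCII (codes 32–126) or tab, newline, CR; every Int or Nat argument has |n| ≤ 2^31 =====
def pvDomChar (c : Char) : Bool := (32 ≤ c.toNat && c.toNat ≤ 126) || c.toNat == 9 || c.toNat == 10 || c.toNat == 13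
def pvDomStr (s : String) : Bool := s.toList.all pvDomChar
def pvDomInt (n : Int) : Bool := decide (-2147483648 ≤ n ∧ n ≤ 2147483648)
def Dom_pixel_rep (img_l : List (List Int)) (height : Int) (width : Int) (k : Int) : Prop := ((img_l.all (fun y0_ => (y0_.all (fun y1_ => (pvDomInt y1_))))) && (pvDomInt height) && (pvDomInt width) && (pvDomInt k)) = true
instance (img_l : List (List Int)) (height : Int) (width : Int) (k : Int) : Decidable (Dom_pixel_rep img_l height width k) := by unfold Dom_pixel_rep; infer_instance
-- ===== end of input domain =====

-- B replaces A's preallocated zeroed matrix and four nested index-assignment loops by direct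
-- construction (build each expanded row once, append k fresh copies); objective: simpler.

-- ===== PORT A =====
-- A's img_l[h][w], ported with pyGetD (under Pre_ every index A's loop bodies evaluate is in
-- range, so the defaults are never used there)
def pvPix (img_l : List (List Int)) (h w : Int) : Int :=
  PySem.List.pyGetD (PySem.List.pyGetD img_l h []) w 0

def pixel_rep (img_l : List (List Int)) (height : Int) (width : Int) (k : Int) : List (List Int) :=
  -- for h … for w … for i in range(h*k, h*k+k) … for j in range(w*k, w*k+k): zoom_ch[i][j] = img_l[h][w]
  -- starting from zoom_ch = [[0 for j in range(width*k)] for i in range(height*k)]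
  (PySem.List.pyRange 0 height 1).foldl (fun z h =>
    (PySem.List.pyRange 0 width 1).foldl (fun z w =>
      (PySem.List.pyRange (h*k) (h*k+k) 1).foldl (fun z i =>
        (PySem.List.pyRange (w*k) (w*k+k) 1).foldl (fun z j =>
          PySem.List.pySetD z i (PySem.List.pySetD (PySem.List.pyGetD z i []) j (pvPix img_l h w))) z) z) z)
    ((PySem.List.pyRange 0 (height*k) 1).map
      (fun _ => (PySem.List.pyRange 0 (width*k) 1).map (fun _ => (0 : Int))))

-- ===== PORT B =====
def pixel_rep_alt (img_l : List (List Int)) (height : Int) (width : Int) (k : Int) : List (List Int) :=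
  (PySem.List.pyRange 0 height 1).foldl (fun zoom_ch h =>
    -- row = []; for w in range(width): row += [img_l[h][w]] * k
    let row := (PySem.List.pyRange 0 width 1).foldl
      (fun row w => row ++ List.replicate k.toNat
        (PySem.List.pyGetD (PySem.List.pyGetD img_l h []) w 0)) []
    -- for _ in range(k): zoom_ch.append(list(row))
    (PySem.List.pyRange 0 k 1).foldl (fun zoom_ch _ => zoom_ch ++ [row]) zoom_ch) []

-- ===== PRECONDITION & SPEC =====
-- Pre_ excludes inputs with height>0 and width>0 where img_l lacks those pixels: with k>0 both
-- programs raise IndexError there, and with k<=0 A returns [] without ever reading img_l while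
-- B's row construction raises IndexError.
def Pre_pixel_rep (img_l : List (List Int)) (height : Int) (width : Int) (k : Int) : Prop :=
  0 < height → 0 < width →
    (height.toNat ≤ img_l.length ∧ ∀ row ∈ img_l.take height.toNat, width.toNat ≤ row.length)
instance (img_l : List (List Int)) (height : Int) (width : Int) (k : Int) : Decidable (Pre_pixel_rep img_l height width k) := by unfold Pre_pixel_rep; infer_instance
def pvWitness_pixel_rep : List (List Int) × Int × Int × Int := ([[1, 2], [3, 4]], 2, 2, 2)

-- When height<0 and k<0, A returns a phantom (height*k) x (width*k) matrix of zeros (its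
-- preallocation multiplies two negatives) while B returns the intended empty list, since a
-- negative height means there are no source rows to replicate.
def D_pixel_rep (img_l : List (List Int)) (height : Int) (width : Int) (k : Int) : Prop :=
  height < 0 ∧ k < 0
instance (img_l : List (List Int)) (height : Int) (width : Int) (k : Int) : Decidable (D_pixel_rep img_l height width k) := by unfold D_pixel_rep; infer_instance

def Spec_pixel_rep (img_l : List (List Int)) (height : Int) (width : Int) (k : Int) (out : List (List Int)) : Prop := ¬ D_pixel_rep img_l height width k → out = pixel_rep_alt img_l height width k
instance (img_l : List (List Int)) (height : Int) (width : Int) (k : Int) (out : List (List Int)) : Decidable (Spec_pixel_rep img_l height width k out) := by unfold Spec_pixel_rep; infer_instance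

def pvDiffWitness_pixel_rep : List (List Int) × Int × Int × Int := ([], -1, 0, -1)
def pvDiffWitnessOut_pixel_rep : (List (List Int)) × (List (List Int)) := ([[]], [])

-- ===== CLAIM (what is proved, stated in full; the proofs are below) =====
def Claim_unchanged_pixel_rep : Prop := ∀ (img_l : List (List Int)) (height : Int) (width : Int) (k : Int), Dom_pixel_rep img_l height width k → Pre_pixel_rep img_l height width k → Spec_pixel_rep img_l height width k (pixel_rep img_l height width k)
def Claim_changed_pixel_rep : Prop := Dom_pixel_rep (pvDiffWitness_pixel_rep.1) (pvDiffWitness_pixel_rep.2.1) (pvDiffWitness_pixel_rep.2.2.1) (pvDiffWitness_pixel_rep.2.2.2) ∧ Pre_pixel_rep (pvDiffWitness_pixel_rep.1) (pvDiffWitness_pixel_rep.2.1) (pvDiffWitness_pixel_rep.2.2.1) (pvDiffWitness_pixel_rep.2.2.2) ∧ D_pixel_rep (pvDiffWitness_pixel_rep.1) (pvDiffWitness_pixel_rep.2.1) (pvDiffWitness_pixel_rep.2.2.1) (pvDiffWitness_pixel_rep.2.2.2) ∧ pixel_rep (pvDiffWitness_pixel_rep.1) (pvDiffWitness_pixel_rep.2.1)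 (pvDiffWitness_pixel_rep.2.2.1) (pvDiffWitness_pixel_rep.2.2.2) = pvDiffWitnessOut_pixel_rep.1 ∧ pixel_rep_alt (pvDiffWitness_pixel_rep.1) (pvDiffWitness_pixel_rep.2.1) (pvDiffWitness_pixel_rep.2.2.1) (pvDiffWitness_pixel_rep.2.2.2) = pvDiffWitnessOut_pixel_rep.2 ∧ pvDiffWitnessOut_pixel_rep.1 ≠ pvDiffWitnessOut_pixel_rep.2
def Claim_exact_pixel_rep : Prop := ∀ (img_l : List (List Int)) (height : Int) (width : Int) (k : Int), Dom_pixel_rep img_l height width k → Pre_pixel_rep img_l height width k → D_pixel_rep img_l height width k → pixel_rep img_l height width k ≠ pixel_rep_alt img_l height width k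

-- ===== LEMMAS AND PROOFS =====

lemma pv_take3 {α : Type} {a : Nat} (P M S : List α) (hP : P.length = a) :
    (P ++ M ++ S).take a = P := by
  rw [List.append_assoc]; exact List.take_left' hP

lemma pv_drop3 {α : Type} {a : Nat} (P M S : List α) (hP : P.length = a) :
    (P ++ M ++ S).drop a = M ++ S := by
  rw [List.append_assoc]; exact List.drop_left' hP

lemma pv_drop3' {α : Type} {a n : Nat} (P M S : List α) (hP : P.length = a) (hM : M.length = n) :
    (P ++ M ++ S).drop (a + n) = S := List.drop_left' (by simp [hP, hM])

lemma pv_getD3 {α : Type} [Inhabited α] {a n : Nat} (P M S : List α) (d : α) (hP : P.length = a)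
    (hM : M.length = n) : (P ++ M ++ S).getD (a + n) d = S.getD 0 d := by
  subst hP hM
  simp [List.getD, List.getElem?_append_right]

lemma pv_set3 {α : Type} {a n : Nat} (P M S : List α) (v : α) (hP : P.length = a)
    (hM : M.length = n) : (P ++ M ++ S).set (a + n) v = P ++ M ++ S.set 0 v := by
  subst hP hM
  simp [List.set_append]

def pvBand (a n : Nat) (g : List Int → List Int) (z : List (List Int)) : List (List Int) :=
  z.take a ++ ((z.drop a).take n).map g ++ z.drop (a + n)

lemma pvBand_length {a n : Nat} {z : List (List Int)} (g : List Int → List Int)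
    (h : a + n ≤ z.length) : (pvBand a n g z).length = z.length := by
  simp [pvBand]; omega

lemma pvBand_band {a n : Nat} {z : List (List Int)} (g₁ g₂ : List Int → List Int)
    (h : a + n ≤ z.length) :
    pvBand a n g₂ (pvBand a n g₁ z) = pvBand a n (fun r => g₂ (g₁ r)) z := by
  have hP : (z.take a).length = a := by simp; omega
  have hM : (((z.drop a).take n).map g₁).length = n := by simp; omega
  unfold pvBand
  rw [pv_take3 _ _ _ hP, pv_drop3 _ _ _ hP, List.take_left' hM, pv_drop3' _ _ _ hP hM,
    List.map_map]
  rfl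

lemma pv_foldl_band {γ : Type} (a n : Nat) (g : γ → List Int → List Int) :
    ∀ (ws : List γ) (z : List (List Int)), a + n ≤ z.length →
      ws.foldl (fun z w => pvBand a n (g w) z) z
        = pvBand a n (fun r => ws.foldl (fun r w => g w r) r) z := by
  intro ws
  induction ws with
  | nil =>
    intro z h
    simp only [List.foldl_nil]
    unfold pvBand
    conv_lhs => rw [← List.take_append_drop a z]
    rw [show z.drop (a + n) = (z.drop a).drop n by rw [List.drop_drop]]
    simp
  | cons w ws ih =>
    intro z h
    simp only [List.foldl_cons]
    rw [ih _ (by rw [pvBand_length _ h]; exact h), pvBand_band _ _ h]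

lemma pv_bandstep (a : Nat) (g : List Int → List Int) : ∀ (n : Nat) (z : List (List Int)),
    a + n ≤ z.length →
    (List.range n).foldl (fun z t => z.set (a + t) (g (z.getD (a + t) []))) z = pvBand a n g z := by
  intro n
  induction n with
  | zero => intro z h; simp [pvBand, List.take_append_drop]
  | succ n ih =>
    intro z h
    rw [List.range_succ, List.foldl_append, List.foldl_cons, List.foldl_nil, ih z (by omega)]
    have hP : (z.take a).length = a := by simp; omega
    have hM : (((z.drop a).take n).map g).length = n := by simp; omega
    have hS : z.drop (a + n) = z[a + n]'(by omega) :: z.drop (a + n + 1) :=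
      List.drop_eq_getElem_cons (by omega)
    have htk : (z.drop a).take (n + 1) = (z.drop a).take n ++ [z[a + n]'(by omega)] := by
      rw [List.take_succ_eq_append_getElem (by simp; omega)]
      congr 1
      simp [List.getElem_drop]
    unfold pvBand
    rw [pv_getD3 _ _ _ _ hP hM, pv_set3 _ _ _ _ hP hM, hS, htk]
    simp [List.getD, show a + (n + 1) = a + n + 1 from by omega]
    rw [hS, List.set_cons_zero, List.getElem?_eq_getElem (show a + n < z.length by omega)]
    rfl


lemma pv_foldl_congr_inv {α β : Type} (P : α → Prop) (f g : α → β → α) :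
    ∀ (l : List β) (z : α), P z → (∀ a b, b ∈ l → P a → P (g a b)) →
      (∀ a b, b ∈ l → P a → f a b = g a b) → l.foldl f z = l.foldl g z := by
  intro l
  induction l with
  | nil => intro z _ _ _; rfl
  | cons b l ih =>
    intro z hz hpres heq
    have hb : f z b = g z b := heq z b (by simp) hz
    simp only [List.foldl_cons, hb]
    exact ih (g z b) (hpres z b (by simp) hz)
      (fun a c hc ha => hpres a c (by simp [hc]) ha)
      (fun a c hc ha => heq a c (by simp [hc]) ha)

lemma pv_setrun (x : Int) : ∀ (n a : Nat) (r : List Int), a + n ≤ r.length →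
    (List.range n).foldl (fun r (t : Nat) => r.set (a + t) x) r
      = r.take a ++ List.replicate n x ++ r.drop (a + n) := by
  intro n
  induction n with
  | zero => intro a r h; simp [List.take_append_drop]
  | succ n ih =>
    intro a r h
    rw [List.range_succ, List.foldl_append, List.foldl_cons, List.foldl_nil, ih a r (by omega)]
    have hP : (r.take a).length = a := by simp; omega
    have hM : (List.replicate n x).length = n := by simp
    have hS : r.drop (a + n) = r[a + n]'(by omega) :: r.drop (a + n + 1) :=
      List.drop_eq_getElem_cons (by omega)
    rw [pv_set3 _ _ _ _ hP hM, hS, List.set_cons_zero,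
      show a + (n + 1) = a + n + 1 by omega,
      show List.replicate (n + 1) x = List.replicate n x ++ [x] from
        (List.replicate_succ' ..)]
    simp

lemma pv_rowcollect (x : Int) (i : Nat) : ∀ (js : List Int) (z : List (List Int)), i < z.length →
    js.foldl (fun z j => z.set i (PySem.List.pySetD (z.getD i []) j x)) z
      = z.set i (js.foldl (fun r j => PySem.List.pySetD r j x) (z.getD i [])) := by
  intro js
  induction js with
  | nil =>
    intro z hi
    simp only [List.foldl_nil]
    rw [List.getD, List.getElem?_eq_getElem hi, Option.getD_some, List.set_getElem_self]
  | cons j js ih =>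
    intro z hi
    simp only [List.foldl_cons]
    rw [ih _ (by simp [hi]), List.set_set]
    congr 1
    congr 1
    rw [List.getD, List.getD, List.getElem?_set_self', List.getElem?_eq_getElem hi]
    rfl

lemma pv_flatlen {α : Type} (K : Nat) (f : Nat → α) : ∀ (m : Nat),
    ((List.range m).flatMap (fun i => List.replicate K (f i))).length = m * K := by
  intro m
  induction m with
  | zero => simp
  | succ m ih => rw [List.range_succ]; simp [ih]; ring

lemma pv_rowfold (K W : Nat) (f : Nat → Int) :
    ∀ (m : Nat), m ≤ W → ∀ (r : List Int), r.length = W * K →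
    (List.range m).foldl (fun r w => r.take (w*K) ++ List.replicate K (f w) ++ r.drop (w*K + K)) r
      = (List.range m).flatMap (fun w => List.replicate K (f w)) ++ r.drop (m*K) := by
  intro m
  induction m with
  | zero => simp
  | succ m ih =>
    intro hm r hr
    rw [List.range_succ, List.foldl_append, List.foldl_cons, List.foldl_nil, ih (by omega) r hr]
    have hP : ((List.range m).flatMap (fun w => List.replicate K (f w))).length = m * K :=
      pv_flatlen K f m
    rw [List.take_left' hP,
      show m*K + K = ((List.range m).flatMap (fun w => List.replicate K (f w))).length + K
        from by omega,
      List.drop_length_add_append, List.drop_drop]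
    simp only [List.flatMap_append, List.flatMap_cons, List.flatMap_nil, List.append_nil]
    rw [show (m+1)*K = m*K + K by ring]

lemma pv_matfold (H K W : Nat) (F : List (List Int) → Nat → List (List Int))
    (g : Nat → List Int → List Int) (R : Nat → List Int)
    (hF : ∀ m z, m < H → z.length = H*K → F z m = pvBand (m*K) K (g m) z)
    (hg : ∀ m, m < H → g m (List.replicate (W*K) (0:Int)) = R m) :
    (List.range H).foldl F (List.replicate (H*K) (List.replicate (W*K) (0:Int)))
      = (List.range H).flatMap (fun h => List.replicate K (R h)) := by
  have key : ∀ m, m ≤ H →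
      (List.range m).foldl F (List.replicate (H*K) (List.replicate (W*K) (0:Int)))
        = (List.range m).flatMap (fun h => List.replicate K (R h))
            ++ List.replicate ((H-m)*K) (List.replicate (W*K) (0:Int)) := by
    intro m
    induction m with
    | zero => simp
    | succ m ih =>
      intro hm
      rw [List.range_succ, List.foldl_append, List.foldl_cons, List.foldl_nil, ih (by omega)]
      have hP : ((List.range m).flatMap (fun h => List.replicate K (R h))).length = m * K :=
        pv_flatlen K R m
      have hlen : ((List.range m).flatMap (fun h => List.replicate K (R h))
          ++ List.replicate ((H-m)*K) (List.replicate (W*K) (0:Int))).length = H*K := by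
        simp [hP]
        rw [← Nat.add_mul, Nat.add_sub_cancel' (by omega : m ≤ H)]
      rw [hF m _ (by omega) hlen]
      unfold pvBand
      have hK1 : K ≤ (H-m)*K := Nat.le_mul_of_pos_left K (by omega)
      rw [List.take_left' hP, List.drop_left' hP, List.take_replicate,
        Nat.min_eq_left hK1, List.map_replicate, hg m (by omega),
        show m*K + K = ((List.range m).flatMap (fun h => List.replicate K (R h))).length + K
          from by omega,
        List.drop_length_add_append, List.drop_replicate]
      simp only [List.flatMap_append, List.flatMap_cons, List.flatMap_nil, List.append_nil]
      congr 1
      congr 1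
      have h1 : (H-(m+1))*K = H*K - (m+1)*K := Nat.sub_mul ..
      have h2 : (m+1)*K = m*K + K := by ring
      have h3 : (m+1)*K ≤ H*K := Nat.mul_le_mul_right K hm
      have h4 : (H-m)*K = H*K - m*K := Nat.sub_mul ..
      omega
  have := key H (le_refl H)
  simpa using this


-- the common specification both ports are reduced to
def pvV (img : List (List Int)) (h w : Nat) : Int := (img.getD h []).getD w 0

def pvRowSpec (img : List (List Int)) (K W : Nat) (h : Nat) : List Int :=
  (List.range W).flatMap (fun w => List.replicate K (pvV img h w))

def pvSpec (img : List (List Int)) (H W K : Nat) : List (List Int) :=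
  (List.range H).flatMap (fun h => List.replicate K (pvRowSpec img K W h))

lemma pv_flat_const {α β : Type} (l : List α) (c : β) :
    l.flatMap (fun _ => [c]) = List.replicate l.length c := by
  induction l with
  | nil => rfl
  | cons a l ih => simp [ih, List.replicate_succ]

lemma pv_b_spec (img : List (List Int)) (height width k : Int) :
    pixel_rep_alt img height width k = pvSpec img height.toNat width.toNat k.toNat := by
  unfold pixel_rep_alt pvSpec
  rw [PySem.List.pyRange_one 0 height, List.foldl_map]
  simp only [zero_add, sub_zero]
  have hbody : ∀ (z : List (List Int)) (m : Nat),
      (fun (zoom_ch : List (List Int)) (h : Int) =>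
        let row := (PySem.List.pyRange 0 width 1).foldl
          (fun row w => row ++ List.replicate k.toNat
            (PySem.List.pyGetD (PySem.List.pyGetD img h []) w 0)) []
        (PySem.List.pyRange 0 k 1).foldl (fun zoom_ch _ => zoom_ch ++ [row]) zoom_ch) z (m : Int)
      = z ++ List.replicate k.toNat (pvRowSpec img k.toNat width.toNat m) := by
    intro z m
    simp only
    have hrow : (PySem.List.pyRange 0 width 1).foldl
        (fun row w => row ++ List.replicate k.toNat
          (PySem.List.pyGetD (PySem.List.pyGetD img (m : Int) []) w 0)) []
        = pvRowSpec img k.toNat width.toNat m := by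
      rw [PySem.List.pyRange_one 0 width, List.foldl_map]
      simp only [zero_add, sub_zero]
      rw [PySem.List.foldl_append_eq_flatMap]
      simp [pvRowSpec, pvV, PySem.List.pyGetD_natCast]
    rw [hrow, PySem.List.foldl_append_eq_flatMap]
    congr 1
    rw [pv_flat_const]
    simp [PySem.List.length_pyRange_one]
  have : ∀ (l : List Nat) (z : List (List Int)),
      l.foldl (fun (z : List (List Int)) (m : Nat) =>
        (fun (zoom_ch : List (List Int)) (h : Int) =>
          let row := (PySem.List.pyRange 0 width 1).foldl
            (fun row w => row ++ List.replicate k.toNat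
              (PySem.List.pyGetD (PySem.List.pyGetD img h []) w 0)) []
          (PySem.List.pyRange 0 k 1).foldl (fun zoom_ch _ => zoom_ch ++ [row]) zoom_ch) z (m : Int)) z
      = l.foldl (fun z m => z ++ List.replicate k.toNat (pvRowSpec img k.toNat width.toNat m)) z := by
    intro l
    induction l with
    | nil => intro z; rfl
    | cons a l ih =>
      intro z
      rw [List.foldl_cons, List.foldl_cons, hbody]
      exact ih _
  rw [this, PySem.List.foldl_append_eq_flatMap]
  simp

lemma pv_A_main (img : List (List Int)) (H K : Nat) (width : Int) (hK : 0 < K) :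
    pixel_rep img (H : Int) width (K : Int) = pvSpec img H width.toNat K := by
  set W := width.toNat with hW
  have hWK : (width * (K : Int)).toNat = W * K := by
    rcases le_or_gt 0 width with hw | hw
    · obtain ⟨w', rfl⟩ := Int.eq_ofNat_of_zero_le hw
      rw [← Nat.cast_mul, Int.toNat_natCast, hW, Int.toNat_natCast]
    · have h1 : width * (K : Int) ≤ 0 :=
        mul_nonpos_iff.mpr (Or.inr ⟨le_of_lt hw, by positivity⟩)
      rw [Int.toNat_of_nonpos h1, hW, Int.toNat_of_nonpos (le_of_lt hw), Nat.zero_mul]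
  have hHK : ((H : Int) * (K : Int)).toNat = H * K := by
    rw [← Nat.cast_mul, Int.toNat_natCast]
  unfold pixel_rep
  -- the zero matrix
  have hz0 : (PySem.List.pyRange 0 ((H : Int)*(K : Int)) 1).map
      (fun _ => (PySem.List.pyRange 0 (width*(K : Int)) 1).map (fun _ => (0:Int)))
      = List.replicate (H*K) (List.replicate (W*K) (0:Int)) := by
    rw [PySem.List.pyRange_one, PySem.List.pyRange_one]
    simp [Function.comp_def, List.map_const', sub_zero, hHK, hWK]
  rw [hz0, PySem.List.pyRange_one 0 (H : Int), List.foldl_map]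
  simp only [sub_zero, Int.toNat_natCast, zero_add]
  show _ = pvSpec img H W K
  unfold pvSpec
  apply pv_matfold H K W _
    (fun m r => (List.range W).foldl
      (fun r (wn : Nat) =>
        (PySem.List.pyRange ((wn:Int)*(K:Int)) ((wn:Int)*(K:Int)+(K:Int)) 1).foldl
          (fun r j => PySem.List.pySetD r j (pvPix img (m:Int) (wn:Int))) r) r)
    (pvRowSpec img K W)
  · intro m z hm hz
    have hmK : m*K + K ≤ H*K := by
      have h1 := Nat.mul_le_mul_right K (show m+1 ≤ H by omega)
      have h2 : (m+1)*K = m*K + K := by ring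
      omega
    rw [PySem.List.pyRange_one 0 width, List.foldl_map]
    simp only [sub_zero, zero_add]
    rw [pv_foldl_congr_inv (fun (z : List (List Int)) => z.length = H*K) _
      (fun z (wn : Nat) => pvBand (m*K) K
        (fun r => (PySem.List.pyRange ((wn:Int)*(K:Int)) ((wn:Int)*(K:Int)+(K:Int)) 1).foldl
          (fun r j => PySem.List.pySetD r j (pvPix img (m:Int) (wn:Int))) r) z)
      (List.range width.toNat) z hz
      (fun a b _ ha => by
        show (pvBand (m*K) K _ a).length = H*K
        rw [pvBand_length _ (by omega)]; exact ha)
      (fun a wn _ ha => by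
        rw [PySem.List.pyRange_one ((m:Int)*(K:Int)) ((m:Int)*(K:Int)+(K:Int)), List.foldl_map]
        simp only [add_sub_cancel_left, Int.toNat_natCast, zero_add]
        rw [pv_foldl_congr_inv (fun (z : List (List Int)) => z.length = H*K) _
          (fun z (t : Nat) => z.set (m*K + t)
            ((fun r => (PySem.List.pyRange ((wn:Int)*(K:Int)) ((wn:Int)*(K:Int)+(K:Int)) 1).foldl
              (fun r j => PySem.List.pySetD r j (pvPix img (m:Int) (wn:Int))) r)
             (z.getD (m*K + t) [])))
          (List.range K) a ha
          (fun b t _ hb => by simp [hb])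
          (fun b t ht hb => by
            rw [show ((m:Int)*(K:Int) + (t:Int)) = (((m*K + t : Nat)) : Int) by push_cast; ring]
            simp only [PySem.List.pySetD_natCast, PySem.List.pyGetD_natCast]
            exact pv_rowcollect (pvPix img (m:Int) (wn:Int)) (m*K+t) _ b
              (by rw [hb]; have := List.mem_range.mp ht; omega))]
        exact pv_bandstep (m*K)
          (fun r => (PySem.List.pyRange ((wn:Int)*(K:Int)) ((wn:Int)*(K:Int)+(K:Int)) 1).foldl
            (fun r j => PySem.List.pySetD r j (pvPix img (m:Int) (wn:Int))) r)
          K a (by omega))]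
    exact pv_foldl_band (m*K) K _ (List.range width.toNat) z (by omega)
  · intro m hm
    rw [pv_foldl_congr_inv (fun (r : List Int) => r.length = W*K) _
      (fun r (wn : Nat) => r.take (wn*K) ++ List.replicate K (pvPix img (m:Int) (wn:Int))
        ++ r.drop (wn*K + K))
      (List.range W) _ (by simp)
      (fun r wn hwn hr => by
        have hbound : wn*K + K ≤ W*K := by
          have h1 := Nat.mul_le_mul_right K (show wn+1 ≤ W from List.mem_range.mp hwn)
          have h2 : (wn+1)*K = wn*K + K := by ring
          omega
        simp only [List.length_append, List.length_take, List.length_replicate,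
          List.length_drop, hr]
        omega)
      (fun r wn hwn hr => by
        have hbound : wn*K + K ≤ W*K := by
          have h1 := Nat.mul_le_mul_right K (show wn+1 ≤ W from List.mem_range.mp hwn)
          have h2 : (wn+1)*K = wn*K + K := by ring
          omega
        rw [PySem.List.pyRange_one ((wn:Int)*(K:Int)) ((wn:Int)*(K:Int)+(K:Int)), List.foldl_map]
        simp only [add_sub_cancel_left, Int.toNat_natCast]
        rw [show (fun (r : List Int) (u : Nat) =>
            PySem.List.pySetD r ((wn:Int)*(K:Int) + (u:Int)) (pvPix img (m:Int) (wn:Int)))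
          = (fun (r : List Int) (u : Nat) => r.set (wn*K + u) (pvPix img (m:Int) (wn:Int))) from
          funext fun r => funext fun u => by
            rw [show ((wn:Int)*(K:Int) + (u:Int)) = (((wn*K + u : Nat)) : Int) by push_cast; ring,
              PySem.List.pySetD_natCast]]
        exact pv_setrun (pvPix img (m:Int) (wn:Int)) K (wn*K) r (by omega))]
    rw [pv_rowfold K W (fun wn => pvPix img (m:Int) (wn:Int)) W le_rfl _ (by simp)]
    unfold pvRowSpec
    simp [pvPix, pvV, PySem.List.pyGetD_natCast]

-- A returns [] whenever k ≤ 0 and the preallocation is empty (height*k ≤ 0)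
lemma pv_A_nonpos_k (img : List (List Int)) (height width k : Int) (hk : k ≤ 0)
    (hhk : height * k ≤ 0) : pixel_rep img height width k = [] := by
  unfold pixel_rep
  have hbody : (fun (z : List (List Int)) (h : Int) =>
      (PySem.List.pyRange 0 width 1).foldl (fun z w =>
        (PySem.List.pyRange (h*k) (h*k+k) 1).foldl (fun z i =>
          (PySem.List.pyRange (w*k) (w*k+k) 1).foldl (fun z j =>
            PySem.List.pySetD z i (PySem.List.pySetD (PySem.List.pyGetD z i []) j (pvPix img h w))) z) z) z)
      = (fun z _ => z) := by
    funext z h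
    rw [show PySem.List.pyRange (h*k) (h*k+k) 1 = [] from
      PySem.List.pyRange_one_eq_nil (by omega)]
    simp only [List.foldl_nil]
    exact List.foldl_fixed _
  rw [hbody, List.foldl_fixed, PySem.List.pyRange_one_eq_nil hhk]
  simp

-- ===== VERDICT (by name: the statement is the Claim_ definition above) =====
theorem pixel_rep_spec : Claim_unchanged_pixel_rep := by
  unfold Claim_unchanged_pixel_rep
  intro img height width k _ _
  unfold Spec_pixel_rep
  intro hD
  unfold D_pixel_rep at hD
  push_neg at hD
  rw [pv_b_spec]
  by_cases hk : 0 < k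
  · by_cases hh : 0 < height
    · have e1 : height = ((height.toNat : Nat) : Int) := (Int.toNat_of_nonneg hh.le).symm
      have e2 : k = ((k.toNat : Nat) : Int) := (Int.toNat_of_nonneg hk.le).symm
      calc pixel_rep img height width k
          = pixel_rep img ((height.toNat : Nat) : Int) width ((k.toNat : Nat) : Int) := by
            rw [← e1, ← e2]
        _ = pvSpec img height.toNat width.toNat k.toNat :=
            pv_A_main img height.toNat k.toNat width (by omega)
    · -- height ≤ 0 with k > 0: both sides are empty
      have hA : pixel_rep img height width k = [] := by
        unfold pixel_rep
        rw [PySem.List.pyRange_one_eq_nil (show height ≤ 0 by omega),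
          PySem.List.pyRange_one_eq_nil
            (show height * k ≤ 0 from mul_nonpos_iff.mpr (Or.inr ⟨by omega, hk.le⟩))]
        simp
      rw [hA, show height.toNat = 0 by omega]
      simp [pvSpec]
  · -- k ≤ 0: A never enters its inner loops, B appends nothing
    have hspec : pvSpec img height.toNat width.toNat k.toNat = [] := by
      simp [pvSpec, show k.toNat = 0 by omega]
    rw [hspec]
    rcases lt_or_ge height 0 with hneg | hpos
    · have hk0 : k = 0 := by have := hD hneg; omega
      exact pv_A_nonpos_k img height width k (by omega) (by rw [hk0, mul_zero])
    · exact pv_A_nonpos_k img height width k (by omega)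
        (mul_nonpos_iff.mpr (Or.inl ⟨hpos, by omega⟩))

theorem pixel_rep_changed : Claim_changed_pixel_rep := by
  unfold Claim_changed_pixel_rep; decide

theorem pixel_rep_tight : Claim_exact_pixel_rep := by
  unfold Claim_exact_pixel_rep
  intro img height width k _ _ hD heq
  obtain ⟨hh, hk⟩ := hD
  have hB : pixel_rep_alt img height width k = [] := by
    rw [pv_b_spec, show height.toNat = 0 by omega]
    simp [pvSpec]
  have hA : pixel_rep img height width k = (PySem.List.pyRange 0 (height*k) 1).map
      (fun _ => (PySem.List.pyRange 0 (width*k) 1).map (fun _ => (0 : Int))) := by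
    unfold pixel_rep
    rw [PySem.List.pyRange_one_eq_nil (le_of_lt hh), List.foldl_nil]
  have hpos : 0 < height * k := mul_pos_of_neg_of_neg hh hk
  rw [hA, hB] at heq
  have hlen := congrArg List.length heq
  simp [PySem.List.length_pyRange_one] at hlen
  omega
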